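-- pv_equiv track=rewrite | github.com/aoleynikov/dudev | prompt_builder/stopping_logic.py | get_question_priority_for_experience
-- ===== SOURCE A (Python) =====
-- from typing import Dict, List
--
-- def get_question_priority_for_experience(profile_dict: Dict, missing_fields: List[str]) -> List[str]:
--     """
--     Reorder missing fields based on experience level and context
--     Returns fields in priority order
--     """
--
--     experience_level = profile_dict.get('experience_level', '').lower()
--     intended_use = profile_dict.get('intended_use', '').lower()
--
--     is_beginner = any(word in experience_level for word in [
--         'beginner', 'junior', 'student', 'learning', 'new'
--     ])
--
--     is_simple_use = any(word in intended_use for word in [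
--         'homework', 'assignment', 'learning', 'hobby', 'personal'
--     ])
--
--     # Priority order for beginners/simple use cases
--     if is_beginner or is_simple_use:
--         beginner_priority = [
--             "intended_use",
--             "primary_languages",
--             "experience_level",
--             "current_project",
--             "testing_approach",  # Simplified testing is good to know
--             "coding_style",      # But keep it simple
--             "tooling_preferences",
--             "workflow_process"   # Least important for beginners
--         ]
--         return [f for f in beginner_priority if f in missing_fields]
--
--     # Standard priority for experienced developers
--     standard_priority = [
--         "intended_use",
--         "primary_languages",
--         "experience_level",
--         "current_project",
--         "workflow_process",
--         "testing_approach",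
--         "coding_style",
--         "tooling_preferences"
--     ]
--
--     return [f for f in standard_priority if f in missing_fields]
-- ===== SOURCE B (Python) =====
-- def get_question_priority_for_experience(profile_dict, missing_fields):
--     def lookup_lower(d, key):
--         return d.get(key, '').lower()
--
--     def has_any(text, words):
--         for w in words:
--             if w in text:
--                 return True
--         return False
--
--     simple = has_any(lookup_lower(profile_dict, 'experience_level'),
--                      ['beginner', 'junior', 'student', 'learning', 'new']) \
--         or has_any(lookup_lower(profile_dict, 'intended_use'),
--                    ['homework', 'assignment', 'learning', 'hobby', 'personal'])
--
--     if simple: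
--         order = ["intended_use", "primary_languages", "experience_level",
--                  "current_project", "testing_approach", "coding_style",
--                  "tooling_preferences", "workflow_process"]
--     else:
--         order = ["intended_use", "primary_languages", "experience_level",
--                  "current_project", "workflow_process", "testing_approach",
--                  "coding_style", "tooling_preferences"]
--     rank = {f: i for i, f in enumerate(order)}
--
--     result = []
--     for f in missing_fields:
--         if f in rank and f not in result:
--             r = rank[f]
--             i = 0
--             while i < len(result) and rank[result[i]] < r:
--                 i += 1
--             result.insert(i, f)
--     return result
-- ===== Notes on version B (the rewrite author's own statement) =====
-- stated objective: alternative
-- what changed: B makes a single pass over missing_fields, inserting each known, not-yet-seen field into the output at its rank position (insertion by a field->index rank table), instead of A's staged filter of a fixed priority list by re-scanning missing_fields for every priority entry.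
import Mathlib
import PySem

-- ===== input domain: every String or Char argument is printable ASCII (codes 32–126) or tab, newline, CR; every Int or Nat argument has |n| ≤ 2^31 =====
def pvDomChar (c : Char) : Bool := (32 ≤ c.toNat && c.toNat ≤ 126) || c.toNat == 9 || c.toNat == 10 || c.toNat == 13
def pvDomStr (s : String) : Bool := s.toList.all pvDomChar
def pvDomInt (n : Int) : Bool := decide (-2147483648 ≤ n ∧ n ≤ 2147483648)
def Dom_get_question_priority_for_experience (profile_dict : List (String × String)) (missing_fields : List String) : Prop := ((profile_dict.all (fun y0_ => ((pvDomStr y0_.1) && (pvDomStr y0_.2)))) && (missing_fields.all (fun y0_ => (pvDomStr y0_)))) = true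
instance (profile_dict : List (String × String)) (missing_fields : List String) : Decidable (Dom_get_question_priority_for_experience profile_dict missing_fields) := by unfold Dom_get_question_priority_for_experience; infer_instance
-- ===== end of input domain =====

-- B builds the result in one pass over missing_fields, inserting each known new field at its rank position (alternative decomposition).


-- ===== PORT A =====
-- Port of A: filter each fixed priority list by membership in missing_fields.
def get_question_priority_for_experience (profile_dict : List (String × String)) (missing_fields : List String) : List String :=
  let experience_level := PySem.Str.lower (PySem.Dict.getD (PySem.Dict.mk profile_dict) "experience_level" "")
  let intended_use := PySem.Str.lower (PySem.Dict.getD (PySem.Dict.mk profile_dict) "intended_use" "")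
  let is_beginner := (["beginner", "junior", "student", "learning", "new"] : List String).any
    (fun word => PySem.Str.isIn word experience_level)
  let is_simple_use := (["homework", "assignment", "learning", "hobby", "personal"] : List String).any
    (fun word => PySem.Str.isIn word intended_use)
  if is_beginner || is_simple_use then
    let beginner_priority : List String :=
      ["intended_use", "primary_languages", "experience_level", "current_project",
       "testing_approach", "coding_style", "tooling_preferences", "workflow_process"]
    beginner_priority.filter (fun f => missing_fields.contains f)
  else
    let standard_priority : List String :=
      ["intended_use", "primary_languages", "experience_level", "current_project",
       "workflow_process", "testing_approach", "coding_style", "tooling_preferences"]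
    standard_priority.filter (fun f => missing_fields.contains f)

-- ===== PORT B =====
-- B-side helpers (Source B's lookup_lower, has_any and the hand-written insertion while-loop).
def lookupLower (d : List (String × String)) (key : String) : String :=
  PySem.Str.lower (PySem.Dict.getD (PySem.Dict.mk d) key "")

def hasAny (text : String) : List String → Bool
  | [] => false
  | w :: ws => if PySem.Str.isIn w text then true else hasAny text ws

-- Source B's while loop: walk past elements of smaller rank, insert f there.
-- rank[x] is ported as getD x 0 — exact here: every x consulted is a key of rank.
def insertByRank (rank : PySem.Dict String Int) (f : String) : List String → List String
  | [] => [f]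
  | x :: xs =>
      if rank.getD x 0 < rank.getD f 0 then x :: insertByRank rank f xs
      else f :: x :: xs

def get_question_priority_for_experience_alt (profile_dict : List (String × String)) (missing_fields : List String) : List String :=
  let simple :=
    hasAny (lookupLower profile_dict "experience_level")
      ["beginner", "junior", "student", "learning", "new"]
    || hasAny (lookupLower profile_dict "intended_use")
      ["homework", "assignment", "learning", "hobby", "personal"]
  let order : List String :=
    if simple then
      ["intended_use", "primary_languages", "experience_level", "current_project",
       "testing_approach", "coding_style", "tooling_preferences", "workflow_process"]
    else
      ["intended_use", "primary_languages", "experience_level", "current_project",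
       "workflow_process", "testing_approach", "coding_style", "tooling_preferences"]
  let rank : PySem.Dict String Int :=
    (PySem.List.enumerate order 0).foldl (fun d p => d.insert p.2 p.1) PySem.Dict.empty
  missing_fields.foldl
    (fun result f =>
      if rank.contains f && !(result.contains f) then insertByRank rank f result
      else result)
    []

-- ===== PRECONDITION & SPEC =====
def Spec_get_question_priority_for_experience (profile_dict : List (String × String)) (missing_fields : List String) (out : List String) : Prop := out = get_question_priority_for_experience_alt profile_dict missing_fields
instance (profile_dict : List (String × String)) (missing_fields : List String) (out : List String) : Decidable (Spec_get_question_priority_for_experience profile_dict missing_fields out) := by unfold Spec_get_question_priority_for_experience; infer_instance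

-- ===== CLAIM =====
def Claim_equal_get_question_priority_for_experience : Prop := ∀ (profile_dict : List (String × String)) (missing_fields : List String), Dom_get_question_priority_for_experience profile_dict missing_fields → Spec_get_question_priority_for_experience profile_dict missing_fields (get_question_priority_for_experience profile_dict missing_fields)

-- ===== LEMMAS AND PROOFS =====

-- has_any is Python's any-over-a-generator.
theorem hasAny_eq (text : String) (ws : List String) :
    hasAny text ws = ws.any (fun w => PySem.Str.isIn w text) := by
  induction ws with
  | nil => rfl
  | cons w ws ih =>
      simp only [hasAny, List.any_cons, ih]
      cases PySem.Str.isIn w text <;> simp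

theorem perm_insertByRank (rank : PySem.Dict String Int) (f : String) (l : List String) :
    List.Perm (insertByRank rank f l) (f :: l) := by
  induction l with
  | nil => rfl
  | cons x xs ih =>
      simp only [insertByRank]
      split
      · exact (ih.cons x).trans (List.Perm.swap f x xs)
      · rfl

theorem mem_insertByRank (rank : PySem.Dict String Int) (f a : String) (l : List String) :
    a ∈ insertByRank rank f l ↔ a = f ∨ a ∈ l := by
  rw [List.Perm.mem_iff (perm_insertByRank rank f l)]
  simp

theorem pairwise_insertByRank (rank : PySem.Dict String Int) (f : String) (l : List String)
    (hp : l.Pairwise (fun a b => rank.getD a 0 < rank.getD b 0))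
    (hne : ∀ x ∈ l, rank.getD f 0 ≠ rank.getD x 0) :
    (insertByRank rank f l).Pairwise (fun a b => rank.getD a 0 < rank.getD b 0) := by
  induction l with
  | nil => simp [insertByRank]
  | cons x xs ih =>
      rw [List.pairwise_cons] at hp
      simp only [insertByRank]
      split
      · rename_i hlt
        rw [List.pairwise_cons]
        refine ⟨fun b hb => ?_, ih hp.2 (fun y hy => hne y (List.mem_cons_of_mem x hy))⟩
        rcases (mem_insertByRank rank f b xs).1 hb with rfl | hbxs
        · exact hlt
        · exact hp.1 b hbxs
      · rename_i hge
        have hflt : rank.getD f 0 < rank.getD x 0 := by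
          rcases lt_or_eq_of_le (le_of_not_gt hge) with h | h
          · exact h
          · exact absurd h (hne x List.mem_cons_self)
        rw [List.pairwise_cons]
        refine ⟨fun b hb => ?_, List.pairwise_cons.2 hp⟩
        rcases List.mem_cons.1 hb with rfl | hb
        · exact hflt
        · exact lt_trans hflt (hp.1 b hb)

-- strict pairwise by a key function makes the key injective on the list
theorem key_inj_of_pairwise {α : Type} (g : α → Int) (l : List α)
    (hp : l.Pairwise (fun a b => g a < g b)) :
    ∀ a ∈ l, ∀ b ∈ l, g a = g b → a = b := by
  induction l with
  | nil => simp
  | cons x xs ih =>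
      rw [List.pairwise_cons] at hp
      intro a ha b hb heq
      rcases List.mem_cons.1 ha with rfl | ha2
      · rcases List.mem_cons.1 hb with rfl | hb2
        · rfl
        · exact absurd heq (ne_of_lt (hp.1 b hb2))
      · rcases List.mem_cons.1 hb with rfl | hb2
        · exact absurd heq.symm (ne_of_lt (hp.1 a ha2))
        · exact ih hp.2 a ha2 b hb2 heq

-- loop invariant of Source B's single pass
theorem fold_inv (rank : PySem.Dict String Int)
    (hinj : ∀ a b, rank.contains a = true → rank.contains b = true →
      rank.getD a 0 = rank.getD b 0 → a = b) :
    ∀ (m acc : List String),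
      acc.Pairwise (fun a b => rank.getD a 0 < rank.getD b 0) →
      (∀ a ∈ acc, rank.contains a = true) →
      (m.foldl (fun result f =>
          if rank.contains f && !(result.contains f) then insertByRank rank f result
          else result) acc).Pairwise (fun a b => rank.getD a 0 < rank.getD b 0) ∧
      (∀ a, a ∈ m.foldl (fun result f =>
          if rank.contains f && !(result.contains f) then insertByRank rank f result
          else result) acc ↔ a ∈ acc ∨ (a ∈ m ∧ rank.contains a = true)) := by
  intro m
  induction m with
  | nil =>
      intro acc hp _
      refine ⟨hp, fun a => by simp⟩
  | cons f fs ih =>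
      intro acc hp hc
      simp only [List.foldl_cons]
      by_cases hcf : rank.contains f = true
      · by_cases hfa : f ∈ acc
        · rw [if_neg (by simp [hfa])]
          obtain ⟨h1, h2⟩ := ih acc hp hc
          refine ⟨h1, fun a => ?_⟩
          rw [h2 a]
          constructor
          · rintro (ha | ⟨ha, hca⟩)
            · exact Or.inl ha
            · exact Or.inr ⟨List.mem_cons_of_mem f ha, hca⟩
          · rintro (ha | ⟨ha, hca⟩)
            · exact Or.inl ha
            · rcases List.mem_cons.1 ha with rfl | ha
              · exact Or.inl hfa
              · exact Or.inr ⟨ha, hca⟩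
        · rw [if_pos (by simp [hcf, hfa])]
          have hne : ∀ x ∈ acc, rank.getD f 0 ≠ rank.getD x 0 := by
            intro x hx heq
            exact hfa ((hinj f x hcf (hc x hx) heq) ▸ hx)
          have hp' := pairwise_insertByRank rank f acc hp hne
          have hc' : ∀ a ∈ insertByRank rank f acc, rank.contains a = true := by
            intro a ha
            rcases (mem_insertByRank rank f a acc).1 ha with rfl | ha
            · exact hcf
            · exact hc a ha
          obtain ⟨h1, h2⟩ := ih (insertByRank rank f acc) hp' hc'
          refine ⟨h1, fun a => ?_⟩
          rw [h2 a, mem_insertByRank]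
          constructor
          · rintro ((rfl | ha) | ⟨ha, hca⟩)
            · exact Or.inr ⟨List.mem_cons_self, hcf⟩
            · exact Or.inl ha
            · exact Or.inr ⟨List.mem_cons_of_mem f ha, hca⟩
          · rintro (ha | ⟨ha, hca⟩)
            · exact Or.inl (Or.inr ha)
            · rcases List.mem_cons.1 ha with rfl | ha
              · exact Or.inl (Or.inl rfl)
              · exact Or.inr ⟨ha, hca⟩
      · rw [if_neg (by simp [hcf])]
        obtain ⟨h1, h2⟩ := ih acc hp hc
        refine ⟨h1, fun a => ?_⟩
        rw [h2 a]
        constructor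
        · rintro (ha | ⟨ha, hca⟩)
          · exact Or.inl ha
          · exact Or.inr ⟨List.mem_cons_of_mem f ha, hca⟩
        · rintro (ha | ⟨ha, hca⟩)
          · exact Or.inl ha
          · rcases List.mem_cons.1 ha with rfl | ha
            · exact absurd hca hcf
            · exact Or.inr ⟨ha, hca⟩

-- Source B's single pass computes A's filter of the priority list
theorem foldl_insert_eq_filter (rank : PySem.Dict String Int) (P m : List String)
    (hkeys : rank.keys = P)
    (hpw : P.Pairwise (fun a b => rank.getD a 0 < rank.getD b 0)) :
    m.foldl (fun result f =>
        if rank.contains f && !(result.contains f) then insertByRank rank f result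
        else result) []
      = P.filter (fun f => m.contains f) := by
  have hmemk : ∀ a, rank.contains a = true ↔ a ∈ P := by
    intro a
    rw [PySem.Dict.contains_eq_decide_mem_keys, hkeys]
    simp
  have hinj : ∀ a b, rank.contains a = true → rank.contains b = true →
      rank.getD a 0 = rank.getD b 0 → a = b := fun a b ha hb =>
    key_inj_of_pairwise _ P hpw a ((hmemk a).1 ha) b ((hmemk b).1 hb)
  obtain ⟨hp, hm⟩ := fold_inv rank hinj m [] (by simp) (by simp)
  have hpf : (P.filter (fun f => m.contains f)).Pairwise
      (fun a b => rank.getD a 0 < rank.getD b 0) := hpw.sublist List.filter_sublist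
  have hperm : List.Perm (m.foldl (fun result f =>
        if rank.contains f && !(result.contains f) then insertByRank rank f result
        else result) []) (P.filter (fun f => m.contains f)) := by
    have hnd : ∀ l : List String,
        l.Pairwise (fun a b => rank.getD a 0 < rank.getD b 0) → l.Nodup :=
      fun l hl => hl.imp (fun h heq => by subst heq; exact lt_irrefl _ h)
    rw [List.perm_ext_iff_of_nodup (hnd _ hp) (hnd _ hpf)]
    intro a
    rw [hm a, List.mem_filter]
    simp [hmemk a, and_comm]
  exact List.Perm.eq_of_pairwise
    (fun a b _ _ h1 h2 => absurd h2 (not_lt.2 (le_of_lt h1))) hp hpf hperm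

-- ===== VERDICT =====
theorem get_question_priority_for_experience_spec : Claim_equal_get_question_priority_for_experience := by
  intro profile_dict missing_fields _
  unfold Spec_get_question_priority_for_experience
  unfold get_question_priority_for_experience get_question_priority_for_experience_alt lookupLower
  simp only [hasAny_eq]
  by_cases hc : ((["beginner", "junior", "student", "learning", "new"] : List String).any
      (fun word => PySem.Str.isIn word (PySem.Str.lower (PySem.Dict.getD (PySem.Dict.mk profile_dict) "experience_level" "")))
    || (["homework", "assignment", "learning", "hobby", "personal"] : List String).any
      (fun word => PySem.Str.isIn word (PySem.Str.lower (PySem.Dict.getD (PySem.Dict.mk profile_dict) "intended_use" "")))) = true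
  · simp only [hc, if_true]
    exact (foldl_insert_eq_filter _ _ missing_fields (by decide) (by decide)).symm
  · rw [Bool.not_eq_true] at hc
    simp only [hc]
    exact (foldl_insert_eq_filter _ _ missing_fields (by decide) (by decide)).symm
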